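-- pv_equiv track=rewrite | github.com/vscaires/CInte-Project2 | mult1.py | hard_constraint
-- ===== SOURCE A (Python) =====
-- def hard_constraint(ind, size):
--     counter = 0
--     for transport in range(size):
--         if ind[transport] == 1:
--             counter += 1
--         else:
--             counter = 0
--             continue
--         if counter > 3:
--             ind[transport] = 0
--             counter = 0
--     return ind
-- ===== SOURCE B (Python) =====
-- def hard_constraint(ind, size):
--     # Segment [0, size) into maximal runs of consecutive 1s (like groupby on
--     # ind[i]==1), then inside each run zero every 4th element with a stride-4
--     # range; non-1 positions and positions >= size are skipped wholesale.
--     i = 0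
--     while i < size:
--         if ind[i] != 1:
--             i += 1
--         else:
--             j = i
--             while j < size and ind[j] == 1:
--                 j += 1
--             for k in range(i + 3, j, 4):
--                 ind[k] = 0
--             i = j
--     return ind
-- ===== Notes on version B (the rewrite author's own statement) =====
-- stated objective: alternative
-- what changed: Instead of A's single index-by-index pass with a reset counter and immediate writes, B segments the first `size` positions into maximal runs of consecutive 1s (a nested run-finding while loop) and, per run, zeroes every 4th element in one stride-4 range assignment, then jumps to the run's end.
import Mathlib
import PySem

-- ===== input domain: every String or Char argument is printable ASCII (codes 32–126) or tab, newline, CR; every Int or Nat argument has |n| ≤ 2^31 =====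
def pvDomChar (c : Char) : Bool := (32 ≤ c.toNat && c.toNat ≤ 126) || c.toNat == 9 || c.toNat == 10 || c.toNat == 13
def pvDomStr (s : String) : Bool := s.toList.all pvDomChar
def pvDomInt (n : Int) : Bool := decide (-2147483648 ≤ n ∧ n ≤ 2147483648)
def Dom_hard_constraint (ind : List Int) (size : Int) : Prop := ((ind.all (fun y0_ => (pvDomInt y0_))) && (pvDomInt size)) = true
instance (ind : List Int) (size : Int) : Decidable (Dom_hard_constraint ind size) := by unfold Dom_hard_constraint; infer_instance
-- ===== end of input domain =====

-- B replaces A's single pass (reset counter, immediate in-place writes) by run-segmentation: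
-- a nested while finds each maximal run of 1s and a stride-4 range zeroes every 4th element;
-- same return value; like A, the Python B mutates `ind` in place (the proved equivalence is
-- about the returned list).


-- ===== PORT A =====
-- the for-loop over range(size) with state (ind, counter); pyGet? none (IndexError) is excluded by Pre_
def hard_constraint_loopA (idxs : List Int) (ind : List Int) (counter : Int) : List Int :=
  match idxs with
  | [] => ind
  | t :: rest =>
    match PySem.List.pyGet? ind t with
    | none => ind   -- IndexError in Python; outside Pre_
    | some v =>
      if v == 1 then
        let counter := counter + 1
        if counter > 3 then
          hard_constraint_loopA rest (PySem.List.pySetD ind t 0) 0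
        else
          hard_constraint_loopA rest ind counter
      else
        hard_constraint_loopA rest ind 0

def hard_constraint (ind : List Int) (size : Int) : List Int :=
  hard_constraint_loopA (PySem.List.pyRange 0 size 1) ind 0

-- ===== PORT B =====
-- inner while: smallest j' ≥ j with j' = size or ind[j'] != 1; reads via pyGetD are total,
-- Pre_ excludes the IndexError inputs
def runEndB (ind : List Int) (size j : Int) : Int :=
  if h : j < size ∧ PySem.List.pyGetD ind j 0 == 1 then runEndB ind size (j + 1) else j
termination_by (size - j).toNat
decreasing_by omega

-- termination helper for the outer loop (cited by decreasing_by below)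
lemma le_runEndB (ind : List Int) (size j : Int) : j ≤ runEndB ind size j := by
  fun_induction runEndB <;> omega

-- outer while over i with in-place stride-4 writes per run
def bLoopB (ind : List Int) (size i : Int) : List Int :=
  if h : i < size then
    if hv : PySem.List.pyGetD ind i 0 == 1 then
      let j := runEndB ind size i
      bLoopB ((PySem.List.pyRange (i + 3) j 4).foldl (fun l k => PySem.List.pySetD l k 0) ind) size j
    else bLoopB ind size (i + 1)
  else ind
termination_by (size - i).toNat
decreasing_by
  · have hj : runEndB ind size i = runEndB ind size (i + 1) := by
      rw [runEndB]; simp [h, hv]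
    have := le_runEndB ind size (i + 1)
    omega
  · omega

def hard_constraint_alt (ind : List Int) (size : Int) : List Int :=
  bLoopB ind size 0

-- ===== PRECONDITION & SPEC =====
-- Pre_ excludes exactly the inputs where Python A raises IndexError: size beyond the list length.
def Pre_hard_constraint (ind : List Int) (size : Int) : Prop := size ≤ (ind.length : Int)
instance (ind : List Int) (size : Int) : Decidable (Pre_hard_constraint ind size) := by
  unfold Pre_hard_constraint; infer_instance

def pvWitness_hard_constraint : List Int × Int := ([1, 1, 1, 1, 1, 0, 1], 7)

def Spec_hard_constraint (ind : List Int) (size : Int) (out : List Int) : Prop := out = hard_constraint_alt ind size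
instance (ind : List Int) (size : Int) (out : List Int) : Decidable (Spec_hard_constraint ind size out) := by unfold Spec_hard_constraint; infer_instance

-- ===== CLAIM (what is proved, stated in full; the proofs are below) =====
def Claim_equal_hard_constraint : Prop := ∀ (ind : List Int) (size : Int), Dom_hard_constraint ind size → Pre_hard_constraint ind size → Spec_hard_constraint ind size (hard_constraint ind size)

-- ===== LEMMAS AND PROOFS =====

-- proof-side bridge: the indices both programs zero (run length a positive multiple of 4)
def marksM (idxs : List Int) (ind : List Int) (run : Int) : List Int :=
  match idxs with
  | [] => []
  | i :: rest =>
    let run := if PySem.List.pyGetD ind i 0 == 1 then run + 1 else 0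
    if run > 0 && PySem.Int.mod run 4 == 0 then
      i :: marksM rest ind run
    else
      marksM rest ind run

-- marksM reads only positions listed in idxs
lemma marksM_congr (idxs : List Int) (l₁ l₂ : List Int) (r : Int)
    (h : ∀ i ∈ idxs, PySem.List.pyGetD l₁ i 0 = PySem.List.pyGetD l₂ i 0) :
    marksM idxs l₁ r = marksM idxs l₂ r := by
  induction idxs generalizing r with
  | nil => rfl
  | cons i rest ih =>
    simp only [marksM, h i (by simp)]
    split <;> rw [ih _ (fun j hj => h j (by simp [hj]))]

-- marksM depends on the run counter only through its residue mod 4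
lemma marksM_run_mod_congr (idxs : List Int) (lst : List Int) (r₁ r₂ : Int)
    (h1 : 0 ≤ r₁) (h2 : 0 ≤ r₂) (h : PySem.Int.mod r₁ 4 = PySem.Int.mod r₂ 4) :
    marksM idxs lst r₁ = marksM idxs lst r₂ := by
  induction idxs generalizing r₁ r₂ with
  | nil => rfl
  | cons i rest ih =>
    by_cases hv : PySem.List.pyGetD lst i 0 = 1
    · simp only [marksM, hv, beq_self_eq_true, if_true]
      have e1 := PySem.Int.floordiv_mul_add_mod r₁ 4
      have e2 := PySem.Int.floordiv_mul_add_mod r₂ 4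
      have e3 := PySem.Int.floordiv_mul_add_mod (r₁ + 1) 4
      have e4 := PySem.Int.floordiv_mul_add_mod (r₂ + 1) 4
      have b1 := PySem.Int.mod_nonneg r₁ (show (0:Int) < 4 by norm_num)
      have b2 := PySem.Int.mod_nonneg r₂ (show (0:Int) < 4 by norm_num)
      have b3 := PySem.Int.mod_lt (a := r₁) (show (0:Int) < 4 by norm_num)
      have b4 := PySem.Int.mod_lt (a := r₂) (show (0:Int) < 4 by norm_num)
      have b5 := PySem.Int.mod_nonneg (r₁ + 1) (show (0:Int) < 4 by norm_num)
      have b6 := PySem.Int.mod_nonneg (r₂ + 1) (show (0:Int) < 4 by norm_num)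
      have b7 := PySem.Int.mod_lt (a := r₁ + 1) (show (0:Int) < 4 by norm_num)
      have b8 := PySem.Int.mod_lt (a := r₂ + 1) (show (0:Int) < 4 by norm_num)
      have hmm : PySem.Int.mod (r₁ + 1) 4 = PySem.Int.mod (r₂ + 1) 4 := by omega
      have hgt : (decide (r₁ + 1 > 0)) = (decide (r₂ + 1 > 0)) := by
        simp [show r₁ + 1 > 0 by omega, show r₂ + 1 > 0 by omega]
      rw [ih _ _ (by omega) (by omega) hmm, hmm, hgt]
    · simp only [marksM, beq_iff_eq, hv, if_false]

-- A's counter equals the run length mod 4, and A's in-place writes commute out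
-- into the deferred sweep over marksM
lemma loopA_eq_marks (idxs : List Int) (lst : List Int) (r : Int)
    (hr : 0 ≤ r)
    (hs : idxs.Pairwise (· < ·))
    (hb : ∀ i ∈ idxs, 0 ≤ i ∧ i < (lst.length : Int)) :
    hard_constraint_loopA idxs lst (PySem.Int.mod r 4)
      = (marksM idxs lst r).foldl (fun l i => PySem.List.pySetD l i 0) lst := by
  induction idxs generalizing lst r with
  | nil => rfl
  | cons i rest ih =>
    obtain ⟨hi0, hilen⟩ := hb i (by simp)
    have hn : i.toNat < lst.length := by omega
    have hget : PySem.List.pyGet? lst i = some (PySem.List.pyGetD lst i 0) := by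
      rw [← Int.toNat_of_nonneg hi0, PySem.List.pyGet?_natCast, PySem.List.pyGetD_natCast]
      simp [List.getElem?_eq_getElem hn, List.getD_eq_getElem?_getD]
    have hrest_b : ∀ j ∈ rest, 0 ≤ j ∧ j < (lst.length : Int) :=
      fun j hj => hb j (by simp [hj])
    have hrest_s : rest.Pairwise (· < ·) := (List.pairwise_cons.mp hs).2
    have e1 := PySem.Int.floordiv_mul_add_mod r 4
    have e2 := PySem.Int.floordiv_mul_add_mod (r + 1) 4
    have b1 := PySem.Int.mod_nonneg r (show (0:Int) < 4 by norm_num)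
    have b2 := PySem.Int.mod_lt (a := r) (show (0:Int) < 4 by norm_num)
    have b3 := PySem.Int.mod_nonneg (r + 1) (show (0:Int) < 4 by norm_num)
    have b4 := PySem.Int.mod_lt (a := r + 1) (show (0:Int) < 4 by norm_num)
    have hz : PySem.Int.mod (0 : Int) 4 = 0 := by decide
    simp only [hard_constraint_loopA, marksM, hget]
    by_cases h1 : PySem.List.pyGetD lst i 0 = 1
    · simp only [h1, beq_self_eq_true, if_true]
      by_cases h4 : PySem.Int.mod (r + 1) 4 = 0
      · have hc3 : PySem.Int.mod r 4 = 3 := by omega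
        rw [hc3]
        have hcond : ((decide (r + 1 > 0)) && (PySem.Int.mod (r + 1) 4 == 0)) = true := by
          rw [h4]; simp [show r + 1 > 0 by omega]
        simp only [hcond, if_pos (show (3:Int) + 1 > 3 by norm_num),
          if_true, List.foldl_cons]
        have hset : ∀ j ∈ rest, PySem.List.pyGetD (PySem.List.pySetD lst i 0) j 0
            = PySem.List.pyGetD lst j 0 := by
          intro j hj
          have hji : i < j := (List.pairwise_cons.mp hs).1 j hj
          have hj0 : 0 ≤ j := (hrest_b j hj).1
          rw [← Int.toNat_of_nonneg hi0, ← Int.toNat_of_nonneg hj0,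
            PySem.List.pyGetD_pySetD_natCast _ _ _ _ _ hn]
          have : ¬ (j.toNat = i.toNat) := by omega
          simp [this]
        have hlen : (PySem.List.pySetD lst i 0).length = lst.length :=
          PySem.List.length_pySetD lst i 0
        have hbset : ∀ j ∈ rest, 0 ≤ j ∧ j < ((PySem.List.pySetD lst i 0).length : Int) := by
          intro j hj; rw [hlen]; exact hrest_b j hj
        have hih := ih (PySem.List.pySetD lst i 0) 0 le_rfl hrest_s hbset
        rw [hz] at hih
        rw [show marksM rest lst (r + 1)
              = marksM rest (PySem.List.pySetD lst i 0) 0 from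
          (marksM_run_mod_congr rest lst (r + 1) 0 (by omega) le_rfl (by rw [h4, hz])).trans
            (marksM_congr rest lst _ 0 (fun j hj => (hset j hj).symm))]
        exact hih
      · have hcc : PySem.Int.mod r 4 + 1 = PySem.Int.mod (r + 1) 4 := by omega
        have hb0 : (PySem.Int.mod (r + 1) 4 == 0) = false := by simp only [beq_eq_false_iff_ne, ne_eq]; exact h4
        rw [if_neg (show ¬ (PySem.Int.mod r 4 + 1 > 3) by omega), hcc, hb0, Bool.and_false]
        simp only [Bool.false_eq_true, if_false]
        exact ih lst (r + 1) (by omega) hrest_s hrest_b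
    · simp only [beq_iff_eq, h1, if_false]
      have hcond : ((decide ((0:Int) > 0)) && (PySem.Int.mod (0:Int) 4 == 0)) = false := by decide
      rw [hcond, if_neg (by simp)]
      have hih := ih lst 0 le_rfl hrest_s hrest_b
      rw [hz] at hih
      exact hih

-- stride-4 range: induction forms
lemma pyRange_four_nil (a b : Int) (h : b ≤ a) : PySem.List.pyRange a b 4 = [] := by
  rw [PySem.List.pyRange_of_pos a b (by norm_num), if_neg (by omega)]
  simp

lemma pyRange_four_cons (a b : Int) (h : a < b) :
    PySem.List.pyRange a b 4 = a :: PySem.List.pyRange (a + 4) b 4 := by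
  rw [PySem.List.pyRange_of_pos a b (by norm_num),
    PySem.List.pyRange_of_pos (a + 4) b (by norm_num), if_pos h]
  by_cases h4 : a + 4 < b
  · rw [if_pos h4]
    have hq : ((b - a + 4 - 1) / 4).toNat = ((b - (a + 4) + 4 - 1) / 4).toNat + 1 := by omega
    rw [hq, List.range_succ_eq_map, List.map_cons, List.map_map]
    congr 1
    · norm_num
    · exact List.map_congr_left (fun k _ => by
        simp only [Function.comp_apply]
        push_cast; ring)
  · rw [if_neg h4]
    have hq : ((b - a + 4 - 1) / 4).toNat = 1 := by omega
    rw [hq]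
    simp [List.range_one]

-- facts about the inner while
lemma runEndB_le_size (ind : List Int) (size j : Int) (h : j ≤ size) : runEndB ind size j ≤ size := by
  fun_induction runEndB <;> omega

lemma runEndB_ones (ind : List Int) (size j : Int) :
    ∀ k, j ≤ k → k < runEndB ind size j → PySem.List.pyGetD ind k 0 = 1 := by
  fun_induction runEndB with
  | case1 j h ih =>
    intro k hk1 hk2
    by_cases hkj : k = j
    · subst hkj; exact beq_iff_eq.mp h.2
    · exact ih k (by omega) hk2
  | case2 j h =>
    intro k hk1 hk2
    omega

lemma runEndB_stop (ind : List Int) (size j : Int) (h : j ≤ size) :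
    runEndB ind size j = size ∨ ¬ (PySem.List.pyGetD ind (runEndB ind size j) 0 = 1) := by
  fun_induction runEndB with
  | case1 j h' ih => exact ih (by omega)
  | case2 j h' =>
    by_cases hjs : j < size
    · right; intro hc; exact h' ⟨hjs, beq_iff_eq.mpr hc⟩
    · left; omega

-- writes below m do not change position m, and preserve length
lemma length_foldl_setD (ws : List Int) (lst : List Int) :
    (ws.foldl (fun l k => PySem.List.pySetD l k 0) lst).length = lst.length := by
  induction ws generalizing lst with
  | nil => rfl
  | cons w ws ih => simp [List.foldl_cons, ih, PySem.List.length_pySetD]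

lemma getD_foldl_setD_lt (ws : List Int) (lst : List Int) (m : Int) (hm : 0 ≤ m)
    (hws : ∀ w ∈ ws, 0 ≤ w ∧ w < (lst.length : Int) ∧ w < m) :
    PySem.List.pyGetD (ws.foldl (fun l k => PySem.List.pySetD l k 0) lst) m 0
      = PySem.List.pyGetD lst m 0 := by
  induction ws generalizing lst with
  | nil => rfl
  | cons w ws ih =>
    obtain ⟨hw0, hwl, hwm⟩ := hws w (by simp)
    have hn : w.toNat < lst.length := by omega
    rw [List.foldl_cons, ih _ (fun u hu => by
      have := hws u (by simp [hu]); rw [PySem.List.length_pySetD]; exact this)]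
    rw [← Int.toNat_of_nonneg hw0, ← Int.toNat_of_nonneg hm,
      PySem.List.pyGetD_pySetD_natCast _ _ _ _ _ hn]
    have : ¬ (m.toNat = w.toNat) := by omega
    simp [this]

-- at a run boundary the initial run counter is irrelevant
lemma marksM_base (ind : List Int) (size j r : Int) (hjs : j ≤ size)
    (hstop : j = size ∨ ¬ (PySem.List.pyGetD ind j 0 = 1)) :
    marksM (PySem.List.pyRange j size 1) ind r = marksM (PySem.List.pyRange j size 1) ind 0 := by
  cases hstop with
  | inl hsz =>
    subst hsz
    rw [PySem.List.pyRange_one_eq_nil le_rfl]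
    rfl
  | inr hne =>
    by_cases hjsz : j < size
    · rw [PySem.List.pyRange_one_cons hjsz]
      simp only [marksM, beq_iff_eq, hne, if_false]
    · rw [PySem.List.pyRange_one_eq_nil (by omega)]
      rfl

-- a maximal run of 1s [i, j) contributes exactly the stride-4 indices to marksM
lemma marksM_run (ind : List Int) (size : Int) :
    ∀ (n : Nat) (i j r : Int), (j - i).toNat ≤ n → 0 ≤ r → i ≤ j → j ≤ size →
    (∀ k, i ≤ k → k < j → PySem.List.pyGetD ind k 0 = 1) →
    (j = size ∨ ¬ (PySem.List.pyGetD ind j 0 = 1)) →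
    marksM (PySem.List.pyRange i size 1) ind r
      = PySem.List.pyRange (i + 3 - PySem.Int.mod r 4) j 4
          ++ marksM (PySem.List.pyRange j size 1) ind 0 := by
  intro n
  induction n with
  | zero =>
    intro i j r hn hr hij hjs hones hstop
    have hij' : i = j := by omega
    subst hij'
    have b1 := PySem.Int.mod_nonneg r (show (0:Int) < 4 by norm_num)
    have b2 := PySem.Int.mod_lt (a := r) (show (0:Int) < 4 by norm_num)
    rw [pyRange_four_nil _ _ (by omega), List.nil_append]
    exact marksM_base ind size i r hjs hstop
  | succ n ih =>
    intro i j r hn hr hij hjs hones hstop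
    by_cases hij' : i = j
    · subst hij'
      have b1 := PySem.Int.mod_nonneg r (show (0:Int) < 4 by norm_num)
      have b2 := PySem.Int.mod_lt (a := r) (show (0:Int) < 4 by norm_num)
      rw [pyRange_four_nil _ _ (by omega), List.nil_append]
      exact marksM_base ind size i r hjs hstop
    · have hilt : i < j := by omega
      have h1 : PySem.List.pyGetD ind i 0 = 1 := hones i le_rfl hilt
      rw [PySem.List.pyRange_one_cons (by omega : i < size)]
      simp only [marksM, h1, beq_self_eq_true, if_true]
      have e1 := PySem.Int.floordiv_mul_add_mod r 4
      have e2 := PySem.Int.floordiv_mul_add_mod (r + 1) 4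
      have b1 := PySem.Int.mod_nonneg r (show (0:Int) < 4 by norm_num)
      have b2 := PySem.Int.mod_lt (a := r) (show (0:Int) < 4 by norm_num)
      have b3 := PySem.Int.mod_nonneg (r + 1) (show (0:Int) < 4 by norm_num)
      have b4 := PySem.Int.mod_lt (a := r + 1) (show (0:Int) < 4 by norm_num)
      have hih := ih (i + 1) j (r + 1) (by omega) (by omega) (by omega) hjs
        (fun k hk1 hk2 => hones k (by omega) hk2) hstop
      by_cases h4 : PySem.Int.mod (r + 1) 4 = 0
      · have hc3 : PySem.Int.mod r 4 = 3 := by omega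
        have hcond : ((decide (r + 1 > 0)) && (PySem.Int.mod (r + 1) 4 == 0)) = true := by
          rw [h4]; simp [show r + 1 > 0 by omega]
        have e4 : i + 1 + 3 - (0 : Int) = i + 4 := by ring
        have e3 : i + 3 - (3 : Int) = i := by ring
        rw [hcond, if_pos rfl, hih, h4, hc3, e4, e3, pyRange_four_cons i j hilt,
          List.cons_append]
      · have hm1 : PySem.Int.mod (r + 1) 4 = PySem.Int.mod r 4 + 1 := by omega
        have hcond : ((decide (r + 1 > 0)) && (PySem.Int.mod (r + 1) 4 == 0)) = false := by
          rw [beq_eq_false_iff_ne.mpr h4, Bool.and_false]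
        have hst : i + 1 + 3 - PySem.Int.mod (r + 1) 4 = i + 3 - PySem.Int.mod r 4 := by omega
        rw [hcond, if_neg (by simp), hih, hst]

-- B equals the deferred sweep over marksM
lemma bLoopB_eq (ind : List Int) (size i : Int) :
    0 ≤ i → size ≤ (ind.length : Int) →
    bLoopB ind size i
      = (marksM (PySem.List.pyRange i size 1) ind 0).foldl
          (fun l k => PySem.List.pySetD l k 0) ind := by
  fun_induction bLoopB ind size i with
  | case1 ind i h hv j ih =>
    intro hi0 hlen
    have hjdef : j = runEndB ind size i := rfl
    rw [hjdef] at *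
    clear hjdef
    have hz : PySem.Int.mod (0 : Int) 4 = 0 := by decide
    have hiJ : i + 1 ≤ runEndB ind size i := by
      have hj : runEndB ind size i = runEndB ind size (i + 1) := by
        rw [runEndB]; simp [h, hv]
      have := le_runEndB ind size (i + 1)
      omega
    have hJs : runEndB ind size i ≤ size := runEndB_le_size ind size i (by omega)
    have hones := runEndB_ones ind size i
    have hstop := runEndB_stop ind size i (by omega)
    have hrun := marksM_run ind size (size).toNat i (runEndB ind size i) 0
      (by omega) le_rfl (by omega) hJs hones hstop
    rw [hz] at hrun
    have e0 : i + 3 - (0 : Int) = i + 3 := by ring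
    rw [e0] at hrun
    -- bounds on the write indices
    have hw : ∀ w ∈ PySem.List.pyRange (i + 3) (runEndB ind size i) 4,
        0 ≤ w ∧ w < (ind.length : Int) ∧ w < runEndB ind size i := by
      intro w hwmem
      have := (PySem.List.mem_pyRange_iff_of_pos (by norm_num : (0:Int) < 4) w).mp hwmem
      refine ⟨by omega, by omega, by omega⟩
    have hlen' := length_foldl_setD (PySem.List.pyRange (i + 3) (runEndB ind size i) 4) ind
    have hcongr : marksM (PySem.List.pyRange (runEndB ind size i) size 1) ind 0
        = marksM (PySem.List.pyRange (runEndB ind size i) size 1)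
            ((PySem.List.pyRange (i + 3) (runEndB ind size i) 4).foldl
              (fun l k => PySem.List.pySetD l k 0) ind) 0 := by
      refine marksM_congr _ _ _ 0 (fun m hm => ?_)
      have hmJ := (PySem.List.mem_pyRange_one).mp hm
      exact (getD_foldl_setD_lt _ ind m (by omega)
        (fun w hwm => ⟨(hw w hwm).1, (hw w hwm).2.1, by have := (hw w hwm).2.2; omega⟩)).symm
    rw [hrun, List.foldl_append, hcongr]
    exact ih (by omega) (by rw [hlen']; exact hlen)
  | case2 ind i h hv ih =>
    intro hi0 hlen
    rw [PySem.List.pyRange_one_cons h]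
    have hv' : (PySem.List.pyGetD ind i 0 == 1) = false := by
      simpa using hv
    simp only [marksM, hv']
    norm_num
    exact ih (by omega) hlen
  | case3 ind i h =>
    intro _ _
    rw [PySem.List.pyRange_one_eq_nil (by omega)]
    rfl

-- ===== VERDICT (by name: the statement is the Claim_ definition above) =====
theorem hard_constraint_spec : Claim_equal_hard_constraint := by
  intro ind size _ hpre
  unfold Spec_hard_constraint hard_constraint hard_constraint_alt
  have h0 : (0 : Int) = PySem.Int.mod 0 4 := by decide
  rw [bLoopB_eq ind size 0 le_rfl hpre, h0]
  exact loopA_eq_marks _ ind 0 le_rfl (PySem.List.pairwise_lt_pyRange_one 0 size)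
    (fun i hi => by
      have := (PySem.List.mem_pyRange_one).mp hi
      exact ⟨this.1, lt_of_lt_of_le this.2 hpre⟩)
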